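-- pv_equiv track=rewrite | github.com/sarishtshreshth0/plag_extract | Project_CodeNet_Python800/p03212/s401888349.py | digit
-- ===== SOURCE A (Python) =====
-- def digit(N, M):
--     def f(j,k):
--         if k==3: res = 1
--         elif k==5: res = 2
--         elif k==7: res = 4
--         return j|res
--
--     L = len(N)
--     dp = [[[0] * M for i in range(L + 1)] for j in range(2)]
--
--     dp[0][0][0] = 1
--     for i in range(1,L):
--         dp[1][i][0] = 1
--     for i in range(L):
--         for j in range(M):
--             for k in [3,5,7]:
--                 if k < int(N[i]):
--                     dp[1][i+1][f(j, k)] += dp[0][i][j] + dp[1][i][j]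
--                 elif k == int(N[i]):
--                     dp[0][i+1][f(j, k)] += dp[0][i][j]
--                     dp[1][i+1][f(j, k)] += dp[1][i][j]
--                 else:
--                     dp[1][i+1][f(j, k)] += dp[1][i][j]
--     return dp[0][L][K] + dp[1][L][K]
--
-- K = 7
-- ===== SOURCE B (Python) =====
-- def digit(N, M):
--     # Count by inclusion-exclusion instead of a bitmask DP table:
--     # strings over {3,5,7} shorter than N are all counted; for the length of N
--     # scan left-to-right while the prefix stays tight, branching to a closed-form
--     # completion count, where ways(m, r) = #length-r strings over {3,5,7} that
--     # contain >= each of m designated missing digits (inclusion-exclusion).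
--     def ways(m, r):
--         c = (1, m, m * (m - 1) // 2, 1 if m == 3 else 0)
--         return sum((-1) ** j * c[j] * (3 - j) ** r for j in range(m + 1))
--
--     L = len(N)
--     total = 0
--     for n in range(1, L):
--         total += ways(3, n)
--     seen = set()
--     for i in range(L):
--         d = int(N[i])
--         for x in (3, 5, 7):
--             if x < d:
--                 total += ways(3 - len(seen | {x}), L - 1 - i)
--         if d not in (3, 5, 7):
--             return total
--         seen.add(d)
--     if len(seen) == 3:
--         return total + 1
--     return total
-- ===== Notes on version B (the rewrite author's own statement) =====
-- stated objective: alternative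
-- what changed: Replaced the 2x(L+1)xM bitmask DP table (triple loop over position, mask, digit) by a closed-form inclusion-exclusion count: digit-strings shorter than N are counted by the formula 3^n-3*2^n+3, and a single tight left-to-right scan adds a closed-form completion count at each branch-off digit.
import Mathlib
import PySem

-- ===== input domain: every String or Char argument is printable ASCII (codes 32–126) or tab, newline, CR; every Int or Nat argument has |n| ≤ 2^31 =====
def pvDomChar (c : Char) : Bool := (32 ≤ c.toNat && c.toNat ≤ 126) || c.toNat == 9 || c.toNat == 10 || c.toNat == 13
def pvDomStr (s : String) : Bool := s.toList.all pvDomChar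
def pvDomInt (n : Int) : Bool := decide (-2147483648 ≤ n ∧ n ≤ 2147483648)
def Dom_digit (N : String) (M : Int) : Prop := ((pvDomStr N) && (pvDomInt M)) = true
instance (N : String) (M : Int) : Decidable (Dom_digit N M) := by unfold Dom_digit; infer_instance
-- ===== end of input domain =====

-- B replaces A's 2×(L+1)×M bitmask DP table by a closed-form inclusion–exclusion count
-- with a single tight left-to-right scan (objective: alternative algorithm).

-- ===== PORT A =====
-- K = 7 (module-level constant)
def pyK : Int := 7

-- f(j,k): k is only ever 3, 5 or 7, so the if-chain always assigns res
def pvF (j : Nat) (k : Int) : Nat :=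
  j ||| (if k = 3 then 1 else if k = 5 then 2 else 4)

-- int(c) for a one-character string; under Pre_ the char is a digit, so getD 0 is never the result
def pvDig (c : Char) : Int := (PySem.Int.ofChars? [c]).getD 0

-- dp[a][b] reads/writes; Python raises IndexError out of range, Pre_ keeps all indices in range
def pvGet2 (m : List (List Int)) (a b : Nat) : Int := (m.getD a []).getD b 0
def pvAdd2 (m : List (List Int)) (a b : Nat) (x : Int) : List (List Int) :=
  m.modify a (fun row => row.modify b (fun y => y + x))
def pvSet2 (m : List (List Int)) (a b : Nat) (x : Int) : List (List Int) :=
  m.modify a (fun row => row.set b x)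

-- the body of the innermost 'for k in [3,5,7]' loop (dN = int(N[i]))
def pvStep (dN : Int) (i : Nat) (st : List (List Int) × List (List Int)) (j : Int) (k : Int) :
    List (List Int) × List (List Int) :=
  if k < dN then
    (st.1, pvAdd2 st.2 (i+1) (pvF j.toNat k) (pvGet2 st.1 i j.toNat + pvGet2 st.2 i j.toNat))
  else if k = dN then
    (pvAdd2 st.1 (i+1) (pvF j.toNat k) (pvGet2 st.1 i j.toNat),
     pvAdd2 st.2 (i+1) (pvF j.toNat k) (pvGet2 st.2 i j.toNat))
  else
    (st.1, pvAdd2 st.2 (i+1) (pvF j.toNat k) (pvGet2 st.2 i j.toNat))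

-- dp is a list of two 2-D tables; held as a pair (dp[0], dp[1]) since Python indexes it only by the literals 0 and 1
def digit (N : String) (M : Int) : Int :=
  let L := N.toList.length
  let d0 : List (List Int) := List.replicate (L+1) (List.replicate M.toNat 0)
  let d1 : List (List Int) := List.replicate (L+1) (List.replicate M.toNat 0)
  let d0 := pvSet2 d0 0 0 1
  let d1 := (PySem.List.pyRange 1 (L : Int) 1).foldl (fun d i => pvSet2 d i.toNat 0 1) d1
  let st := (PySem.List.pyRange 0 (L : Int) 1).foldl (fun st i =>
    (PySem.List.pyRange 0 M 1).foldl (fun st j =>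
      ([3, 5, 7] : List Int).foldl
        (fun st k => pvStep (pvDig (N.toList.getD i.toNat ' ')) i.toNat st j k) st) st) (d0, d1)
  pvGet2 st.1 L pyK.toNat + pvGet2 st.2 L pyK.toNat

-- ===== PORT B =====
-- ways(m, r): inclusion–exclusion count of length-r strings over {3,5,7} containing m designated digits
def pvWays (m : Int) (r : Int) : Int :=
  let c : List Int := [1, m, PySem.Int.floordiv (m * (m - 1)) 2, if m = 3 then 1 else 0]
  (PySem.List.pyRange 0 (m + 1) 1).foldl
    (fun s j => s + (-1) ^ j.toNat * ((PySem.List.pyGet? c j).getD 0) * (3 - j) ^ r.toNat) 0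
    -- exponents j, r are nonnegative at every call site, so ^ .toNat is Python's **

-- the tight scan 'for i in range(L)' with its early return, as structural recursion on the suffix
-- (L - 1 - i = rest.length)
def pvScan : List Char → PySem.Set Int → Int → Int
  | [], seen, total => if PySem.Set.len seen = 3 then total + 1 else total
  | c :: rest, seen, total =>
    let d := pvDig c
    let total := ([3, 5, 7] : List Int).foldl
      (fun t x => if x < d then
          t + pvWays (3 - PySem.Set.len (PySem.Set.union seen [x])) (rest.length : Int)
        else t) total
    if ([3, 5, 7] : List Int).contains d then pvScan rest (PySem.Set.add seen d) total
    else total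

def digit_alt (N : String) (M : Int) : Int :=
  let L := (N.toList.length : Int)
  let total := (PySem.List.pyRange 1 L 1).foldl (fun t n => t + pvWays 3 n) 0
  pvScan N.toList PySem.Set.empty total

-- ===== PRECONDITION & SPEC =====
-- Pre_ is exactly where Python A returns normally: every character of N a decimal digit
-- (otherwise int(N[i]) raises ValueError), M ≥ 8 (dp[0][0][0] = 1 and the final dp[·][L][7]
-- reads need it), and, when N is nonempty, 8 ∣ M (otherwise some write dp[1][i+1][j|res]
-- with j < M overflows the row: IndexError).
def Pre_digit (N : String) (M : Int) : Prop :=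
  (N.toList.all PySem.Chars.isdigit = true) ∧ 8 ≤ M ∧ (N.toList = [] ∨ (8 : Int) ∣ M)
instance (N : String) (M : Int) : Decidable (Pre_digit N M) := by unfold Pre_digit; infer_instance
def pvWitness_digit : String × Int := ("53", 8)

def Spec_digit (N : String) (M : Int) (out : Int) : Prop := out = digit_alt N M
instance (N : String) (M : Int) (out : Int) : Decidable (Spec_digit N M out) := by unfold Spec_digit; infer_instance

-- ===== CLAIM (what is proved, stated in full; the proofs are below) =====
def Claim_equal_digit : Prop := ∀ (N : String) (M : Int), Dom_digit N M → Pre_digit N M → Spec_digit N M (digit N M)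

-- ===== LEMMAS AND PROOFS =====

-- ---------- generic nested-list (dp table) lemmas ----------
theorem length_pvAdd2 (m : List (List Int)) (a b : Nat) (x : Int) :
    (pvAdd2 m a b x).length = m.length := by
  simp [pvAdd2]

theorem row_pvAdd2 (m : List (List Int)) (a b : Nat) (x : Int) (r : Nat) :
    ((pvAdd2 m a b x).getD r []).length = (m.getD r []).length := by
  unfold pvAdd2
  cases h : m[r]? <;> by_cases hr : a = r <;> simp [List.getD, h, hr, List.length_modify]

theorem pvGet2_pvAdd2 (m : List (List Int)) (a b : Nat) (x : Int)
    (ha : a < m.length) (hb : b < (m.getD a []).length) (r c : Nat) :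
    pvGet2 (pvAdd2 m a b x) r c = pvGet2 m r c + if r = a ∧ c = b then x else 0 := by
  unfold pvGet2 pvAdd2
  by_cases hr : r = a
  · subst hr
    have hm : m[r]? = some (m[r]'ha) := List.getElem?_eq_getElem ha
    have hb' : b < (m[r]'ha).length := by simpa [List.getD, hm] using hb
    by_cases hc : c = b
    · subst hc
      simp [List.getD, hm, List.getElem?_eq_getElem hb']
    · simp [List.getD, hm, hc, Ne.symm hc]
  · simp [List.getD, Ne.symm hr, hr]

theorem length_pvSet2 (m : List (List Int)) (a b : Nat) (x : Int) :
    (pvSet2 m a b x).length = m.length := by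
  simp [pvSet2]

theorem row_pvSet2 (m : List (List Int)) (a b : Nat) (x : Int) (r : Nat) :
    ((pvSet2 m a b x).getD r []).length = (m.getD r []).length := by
  unfold pvSet2
  cases h : m[r]? <;> by_cases hr : a = r <;> simp [List.getD, h, hr]

theorem pvGet2_pvSet2 (m : List (List Int)) (a b : Nat) (x : Int)
    (ha : a < m.length) (hb : b < (m.getD a []).length) (r c : Nat) :
    pvGet2 (pvSet2 m a b x) r c = if r = a ∧ c = b then x else pvGet2 m r c := by
  unfold pvGet2 pvSet2
  by_cases hr : r = a
  · subst hr
    have hm : m[r]? = some (m[r]'ha) := List.getElem?_eq_getElem ha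
    have hb' : b < (m[r]'ha).length := by simpa [List.getD, hm] using hb
    by_cases hc : c = b
    · subst hc
      simp [List.getD, hm, List.getElem?_set_self, hb']
    · simp [List.getD, hm, hc, Ne.symm hc]
  · simp [List.getD, Ne.symm hr, hr]

theorem pvGet2_replicate (n Mn r c : Nat) :
    pvGet2 (List.replicate n (List.replicate Mn (0 : Int))) r c = 0 := by
  unfold pvGet2
  by_cases hr : r < n <;> by_cases hc : c < Mn <;>
    simp [List.getD, List.getElem?_replicate, hr, hc]

-- ---------- bit arithmetic ----------
def pvBit (k : Int) : Nat := if k = 3 then 1 else if k = 5 then 2 else 4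

theorem pvF_eq (j : Nat) (k : Int) : pvF j k = j ||| pvBit k := rfl

theorem pvBit_lt8 (k : Int) : pvBit k < 8 := by
  unfold pvBit; split_ifs <;> norm_num

theorem pvF_lt8 {j : Nat} (hj : j < 8) (k : Int) : pvF j k < 8 := by
  rw [pvF_eq]
  exact Nat.or_lt_two_pow (n := 3) hj (pvBit_lt8 k)

theorem pvF_lt_of_dvd {j Mn : Nat} (h8 : 8 ∣ Mn) (hj : j < Mn) (k : Int) : pvF j k < Mn := by
  rw [pvF_eq]
  obtain ⟨q, s, hs, rfl⟩ : ∃ q s, s < 8 ∧ j = 8 * q + s :=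
    ⟨j / 8, j % 8, Nat.mod_lt _ (by norm_num), (Nat.div_add_mod j 8).symm⟩
  have hor : (8 * q + s) ||| pvBit k = 8 * q + (s ||| pvBit k) := by
    have e1 : 2^3 * q + s = 2^3 * q ||| s := Nat.two_pow_add_eq_or_of_lt hs _
    have e2 : 2^3 * q + (s ||| pvBit k) = 2^3 * q ||| (s ||| pvBit k) :=
      Nat.two_pow_add_eq_or_of_lt (Nat.or_lt_two_pow (n := 3) hs (pvBit_lt8 k)) _
    calc (8 * q + s) ||| pvBit k = (2^3 * q ||| s) ||| pvBit k := by rw [← e1]; norm_num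
    _ = 2^3 * q ||| (s ||| pvBit k) := Nat.or_assoc _ _ _
    _ = 8 * q + (s ||| pvBit k) := by rw [← e2]; norm_num
  rw [hor]
  have h2 : s ||| pvBit k < 8 := Nat.or_lt_two_pow (n := 3) hs (pvBit_lt8 k)
  omega

-- ---------- the functional model of A's table ----------
def pvKs : List Int := [3, 5, 7]

def pvSeed (N : String) (r c : Nat) : Int :=
  if 1 ≤ r ∧ r < N.toList.length ∧ c = 0 then 1 else 0

def pvT (N : String) : Nat → Nat → Int
  | 0, c => if c = 0 then 1 else 0
  | i+1, c => ((List.range 8).map (fun j => (pvKs.map (fun k =>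
      if c = pvF j k ∧ k = pvDig (N.toList.getD i ' ') then pvT N i j else 0)).sum)).sum

def pvV (N : String) : Nat → Nat → Int
  | 0, _ => 0
  | i+1, c => pvSeed N (i+1) c + ((List.range 8).map (fun j => (pvKs.map (fun k =>
      if c = pvF j k then
        pvV N i j + (if k < pvDig (N.toList.getD i ' ') then pvT N i j else 0)
      else 0)).sum)).sum

-- per-j contributions of one middle-loop iteration (amounts read from the model)
def pvS0 (N : String) (i j c : Nat) : Int :=
  (pvKs.map (fun k =>
    if c = pvF j k ∧ k = pvDig (N.toList.getD i ' ') then pvT N i j else 0)).sum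

def pvS1 (N : String) (i j c : Nat) : Int :=
  (pvKs.map (fun k =>
    if c = pvF j k then
      pvV N i j + (if k < pvDig (N.toList.getD i ' ') then pvT N i j else 0)
    else 0)).sum

theorem pvT_succ (N : String) (i c : Nat) :
    pvT N (i+1) c = ((List.range 8).map (fun j => pvS0 N i j c)).sum := rfl

theorem pvV_succ (N : String) (i c : Nat) :
    pvV N (i+1) c = pvSeed N (i+1) c + ((List.range 8).map (fun j => pvS1 N i j c)).sum := rfl

theorem pvT_hi (N : String) (i : Nat) {c : Nat} (hc : 8 ≤ c) : pvT N i c = 0 := by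
  cases i with
  | zero => simp only [pvT]; rw [if_neg]; omega
  | succ i =>
    simp only [pvT]
    apply List.sum_eq_zero
    intro x hx
    simp only [List.mem_map, List.mem_range] at hx
    obtain ⟨j, hj, rfl⟩ := hx
    apply List.sum_eq_zero
    intro y hy
    simp only [List.mem_map] at hy
    obtain ⟨k, hk, rfl⟩ := hy
    have := pvF_lt8 hj k
    rw [if_neg]; rintro ⟨rfl, -⟩; omega

theorem pvV_hi (N : String) (i : Nat) {c : Nat} (hc : 8 ≤ c) : pvV N i c = 0 := by
  cases i with
  | zero => simp [pvV]
  | succ i =>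
    simp only [pvV]
    rw [show pvSeed N (i+1) c = 0 by unfold pvSeed; rw [if_neg]; omega]
    rw [zero_add]
    apply List.sum_eq_zero
    intro x hx
    simp only [List.mem_map, List.mem_range] at hx
    obtain ⟨j, hj, rfl⟩ := hx
    apply List.sum_eq_zero
    intro y hy
    simp only [List.mem_map] at hy
    obtain ⟨k, hk, rfl⟩ := hy
    have := pvF_lt8 hj k
    rw [if_neg]; intro h; omega

theorem pvS0_hi (N : String) (i : Nat) {j : Nat} (hj : 8 ≤ j) (c : Nat) : pvS0 N i j c = 0 := by
  unfold pvS0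
  apply List.sum_eq_zero
  intro y hy
  simp only [List.mem_map] at hy
  obtain ⟨k, hk, rfl⟩ := hy
  simp [pvT_hi N i hj]

theorem pvS1_hi (N : String) (i : Nat) {j : Nat} (hj : 8 ≤ j) (c : Nat) : pvS1 N i j c = 0 := by
  unfold pvS1
  apply List.sum_eq_zero
  intro y hy
  simp only [List.mem_map] at hy
  obtain ⟨k, hk, rfl⟩ := hy
  simp [pvT_hi N i hj, pvV_hi N i hj]

-- row-description functions: the table state after processing the first i columns
def pvD0 (N : String) (i r c : Nat) : Int := if r ≤ i then pvT N r c else 0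
def pvD1 (N : String) (i r c : Nat) : Int := if r ≤ i then pvV N r c else pvSeed N r c

-- ---------- phase 1: the fold over one j (three k-steps) ----------
theorem pvStep_desc (d : Int) (i : Nat) (st : List (List Int) × List (List Int)) (j k : Int)
    (h1 : i + 1 < st.1.length) (h2 : pvF j.toNat k < (st.1.getD (i+1) []).length)
    (h1' : i + 1 < st.2.length) (h2' : pvF j.toNat k < (st.2.getD (i+1) []).length) :
    (pvStep d i st j k).1.length = st.1.length ∧
    (pvStep d i st j k).2.length = st.2.length ∧
    (∀ r, ((pvStep d i st j k).1.getD r []).length = (st.1.getD r []).length) ∧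
    (∀ r, ((pvStep d i st j k).2.getD r []).length = (st.2.getD r []).length) ∧
    (∀ r c, pvGet2 (pvStep d i st j k).1 r c = pvGet2 st.1 r c +
      if r = i+1 ∧ c = pvF j.toNat k ∧ k = d then pvGet2 st.1 i j.toNat else 0) ∧
    (∀ r c, pvGet2 (pvStep d i st j k).2 r c = pvGet2 st.2 r c +
      if r = i+1 ∧ c = pvF j.toNat k then
        pvGet2 st.2 i j.toNat + (if k < d then pvGet2 st.1 i j.toNat else 0)
      else 0) := by
  unfold pvStep
  split_ifs with h1d h2d
  · -- k < d
    refine ⟨rfl, length_pvAdd2 _ _ _ _, fun r => rfl, fun r => row_pvAdd2 _ _ _ _ r, ?_, ?_⟩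
    · intro r c
      rw [if_neg (by rintro ⟨-, -, rfl⟩; exact absurd h1d (lt_irrefl _))]
      simp
    · intro r c
      rw [pvGet2_pvAdd2 _ _ _ _ h1' h2' r c]
      by_cases h : r = i+1 ∧ c = pvF j.toNat k
      · rw [if_pos ⟨h.1, h.2⟩, if_pos ⟨h.1, h.2⟩]; ring
      · rw [if_neg h, if_neg h]
  · -- k = d
    subst h2d
    refine ⟨length_pvAdd2 _ _ _ _, length_pvAdd2 _ _ _ _,
      (fun r => row_pvAdd2 _ _ _ _ r), (fun r => row_pvAdd2 _ _ _ _ r), ?_, ?_⟩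
    · intro r c
      rw [pvGet2_pvAdd2 _ _ _ _ h1 h2 r c]
      congr 1
      by_cases h : r = i+1 ∧ c = pvF j.toNat k
      · rw [if_pos ⟨h.1, h.2⟩, if_pos ⟨h.1, h.2, rfl⟩]
      · rw [if_neg h, if_neg (fun hh => h ⟨hh.1, hh.2.1⟩)]
    · intro r c
      rw [pvGet2_pvAdd2 _ _ _ _ h1' h2' r c]
      by_cases h : r = i+1 ∧ c = pvF j.toNat k
      · rw [if_pos ⟨h.1, h.2⟩, if_pos ⟨h.1, h.2⟩]; ring
      · rw [if_neg h, if_neg h]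
  · -- k > d
    refine ⟨rfl, length_pvAdd2 _ _ _ _, fun r => rfl, fun r => row_pvAdd2 _ _ _ _ r, ?_, ?_⟩
    · intro r c
      rw [if_neg (by rintro ⟨-, -, rfl⟩; exact h2d rfl)]
      simp
    · intro r c
      rw [pvGet2_pvAdd2 _ _ _ _ h1' h2' r c]
      by_cases h : r = i+1 ∧ c = pvF j.toNat k
      · rw [if_pos ⟨h.1, h.2⟩, if_pos ⟨h.1, h.2⟩]; ring
      · rw [if_neg h, if_neg h]

-- ---------- phase 1: one middle-loop iteration (the three k-steps) ----------
theorem pvRowJ (d : Int) (i : Nat) (n Mn : Nat) (hi : i < n) (hdvd : 8 ∣ Mn)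
    (j : Int) (hjN : j.toNat < Mn)
    (st : List (List Int) × List (List Int))
    (hl0 : st.1.length = n + 1) (hl1 : st.2.length = n + 1)
    (hr0 : ∀ r, ((st.1.getD r []).length) = if r < n + 1 then Mn else 0)
    (hr1 : ∀ r, ((st.2.getD r []).length) = if r < n + 1 then Mn else 0) :
    let st' := pvKs.foldl (fun st k => pvStep d i st j k) st
    st'.1.length = n + 1 ∧ st'.2.length = n + 1 ∧
    (∀ r, ((st'.1.getD r []).length) = if r < n + 1 then Mn else 0) ∧
    (∀ r, ((st'.2.getD r []).length) = if r < n + 1 then Mn else 0) ∧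
    (∀ r c, pvGet2 st'.1 r c = pvGet2 st.1 r c + if r = i+1 then
      (pvKs.map (fun k => if c = pvF j.toNat k ∧ k = d then pvGet2 st.1 i j.toNat else 0)).sum
      else 0) ∧
    (∀ r c, pvGet2 st'.2 r c = pvGet2 st.2 r c + if r = i+1 then
      (pvKs.map (fun k => if c = pvF j.toNat k then
        pvGet2 st.2 i j.toNat + (if k < d then pvGet2 st.1 i j.toNat else 0) else 0)).sum
      else 0) := by
  intro st'
  have hb : ∀ (s : List (List Int) × List (List Int)) (k : Int),
      s.1.length = n + 1 → s.2.length = n + 1 →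
      (∀ r, ((s.1.getD r []).length) = if r < n + 1 then Mn else 0) →
      (∀ r, ((s.2.getD r []).length) = if r < n + 1 then Mn else 0) →
      i + 1 < s.1.length ∧ pvF j.toNat k < (s.1.getD (i+1) []).length ∧
      i + 1 < s.2.length ∧ pvF j.toNat k < (s.2.getD (i+1) []).length := by
    intro s k a0 a1 b0 b1
    have hF : pvF j.toNat k < Mn := pvF_lt_of_dvd hdvd hjN k
    refine ⟨by omega, ?_, by omega, ?_⟩
    · rw [b0]; rw [if_pos (by omega)]; exact hF
    · rw [b1]; rw [if_pos (by omega)]; exact hF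
  obtain ⟨q1, q2, q3, q4⟩ := hb st 3 hl0 hl1 hr0 hr1
  obtain ⟨A1, A2, A3, A4, A5, A6⟩ := pvStep_desc d i st j 3 q1 q2 q3 q4
  set s1 := pvStep d i st j 3 with hs1
  obtain ⟨w1, w2, w3, w4⟩ := hb s1 5 (A1.trans hl0) (A2.trans hl1)
    (fun r => (A3 r).trans (hr0 r)) (fun r => (A4 r).trans (hr1 r))
  obtain ⟨B1, B2, B3, B4, B5, B6⟩ := pvStep_desc d i s1 j 5 w1 w2 w3 w4
  set s2 := pvStep d i s1 j 5 with hs2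
  obtain ⟨x1, x2, x3, x4⟩ := hb s2 7 (B1.trans (A1.trans hl0)) (B2.trans (A2.trans hl1))
    (fun r => (B3 r).trans ((A3 r).trans (hr0 r))) (fun r => (B4 r).trans ((A4 r).trans (hr1 r)))
  obtain ⟨C1, C2, C3, C4, C5, C6⟩ := pvStep_desc d i s2 j 7 x1 x2 x3 x4
  have hstep : st' = pvStep d i s2 j 7 := rfl
  have hne : i ≠ i + 1 := by omega
  have rA0 : pvGet2 s1.1 i j.toNat = pvGet2 st.1 i j.toNat := by
    rw [A5]; rw [if_neg (by rintro ⟨h, -⟩; exact hne h)]; ring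
  have rA1 : pvGet2 s1.2 i j.toNat = pvGet2 st.2 i j.toNat := by
    rw [A6]; rw [if_neg (by rintro ⟨h, -⟩; exact hne h)]; ring
  have rB0 : pvGet2 s2.1 i j.toNat = pvGet2 st.1 i j.toNat := by
    rw [B5]; rw [if_neg (by rintro ⟨h, -⟩; exact hne h)]; rw [rA0]; ring
  have rB1 : pvGet2 s2.2 i j.toNat = pvGet2 st.2 i j.toNat := by
    rw [B6]; rw [if_neg (by rintro ⟨h, -⟩; exact hne h)]; rw [rA1]; ring
  rw [hstep]
  refine ⟨C1.trans (B1.trans (A1.trans hl0)), C2.trans (B2.trans (A2.trans hl1)),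
    (fun r => (C3 r).trans ((B3 r).trans ((A3 r).trans (hr0 r)))),
    (fun r => (C4 r).trans ((B4 r).trans ((A4 r).trans (hr1 r)))), ?_, ?_⟩
  · intro r c
    rw [C5 r c, B5 r c, A5 r c, rB0, rA0]
    by_cases hr : r = i + 1
    · subst hr
      simp only [pvKs, List.map_cons, List.map_nil, List.sum_cons, List.sum_nil, if_pos rfl]
      by_cases h3 : c = pvF j.toNat 3 ∧ (3:Int) = d <;>
        by_cases h5 : c = pvF j.toNat 5 ∧ (5:Int) = d <;>
          by_cases h7 : c = pvF j.toNat 7 ∧ (7:Int) = d <;>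
            simp only [if_pos, if_neg, h3, h5, h7, if_true, if_false, ite_true, ite_false] <;>
              simp [h3, h5, h7] <;> ring
    · simp only [if_neg hr, if_neg (fun hh : r = i+1 ∧ c = pvF j.toNat 3 ∧ (3:Int) = d => hr hh.1),
        if_neg (fun hh : r = i+1 ∧ c = pvF j.toNat 5 ∧ (5:Int) = d => hr hh.1),
        if_neg (fun hh : r = i+1 ∧ c = pvF j.toNat 7 ∧ (7:Int) = d => hr hh.1)]
      ring
  · intro r c
    rw [C6 r c, B6 r c, A6 r c, rB1, rB0, rA1, rA0]
    by_cases hr : r = i + 1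
    · subst hr
      simp only [pvKs, List.map_cons, List.map_nil, List.sum_cons, List.sum_nil, if_pos rfl]
      by_cases h3 : c = pvF j.toNat 3 <;> by_cases h5 : c = pvF j.toNat 5 <;>
        by_cases h7 : c = pvF j.toNat 7 <;> simp [h3, h5, h7] <;> ring
    · simp only [if_neg hr, if_neg (fun hh : r = i+1 ∧ c = pvF j.toNat 3 => hr hh.1),
        if_neg (fun hh : r = i+1 ∧ c = pvF j.toNat 5 => hr hh.1),
        if_neg (fun hh : r = i+1 ∧ c = pvF j.toNat 7 => hr hh.1)]
      ring

-- ---------- phase 1: the middle loop over j ----------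
theorem pvCol (N : String) (M : Int) (i : Nat) (hi : i < N.toList.length)
    (hdvd : 8 ∣ M.toNat)
    (js : List Int) (hjs : ∀ j ∈ js, 0 ≤ j ∧ j < M)
    (st : List (List Int) × List (List Int)) (e0 e1 : Nat → Int)
    (hl0 : st.1.length = N.toList.length + 1) (hl1 : st.2.length = N.toList.length + 1)
    (hr0 : ∀ r, ((st.1.getD r []).length) = if r < N.toList.length + 1 then M.toNat else 0)
    (hr1 : ∀ r, ((st.2.getD r []).length) = if r < N.toList.length + 1 then M.toNat else 0)
    (hv0 : ∀ r c, pvGet2 st.1 r c = pvD0 N i r c + if r = i+1 then e0 c else 0)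
    (hv1 : ∀ r c, pvGet2 st.2 r c = pvD1 N i r c + if r = i+1 then e1 c else 0) :
    let st' := js.foldl (fun st j => pvKs.foldl
      (fun st k => pvStep (pvDig (N.toList.getD i ' ')) i st j k) st) st
    st'.1.length = N.toList.length + 1 ∧ st'.2.length = N.toList.length + 1 ∧
    (∀ r, ((st'.1.getD r []).length) = if r < N.toList.length + 1 then M.toNat else 0) ∧
    (∀ r, ((st'.2.getD r []).length) = if r < N.toList.length + 1 then M.toNat else 0) ∧
    (∀ r c, pvGet2 st'.1 r c = pvD0 N i r c +
      if r = i+1 then e0 c + (js.map (fun j => pvS0 N i j.toNat c)).sum else 0) ∧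
    (∀ r c, pvGet2 st'.2 r c = pvD1 N i r c +
      if r = i+1 then e1 c + (js.map (fun j => pvS1 N i j.toNat c)).sum else 0) := by
  intro st'
  induction js generalizing st e0 e1 with
  | nil =>
    refine ⟨hl0, hl1, hr0, hr1, fun r c => ?_, fun r c => ?_⟩
    · rw [show st' = st from rfl, hv0 r c]; simp
    · rw [show st' = st from rfl, hv1 r c]; simp
  | cons j js ih =>
    obtain ⟨hj0, hjM⟩ := hjs j (by simp)
    have hjs' : ∀ x ∈ js, 0 ≤ x ∧ x < M := fun x hx => hjs x (by simp [hx])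
    have hjN : j.toNat < M.toNat := by omega
    obtain ⟨P1, P2, P3, P4, P5, P6⟩ :=
      pvRowJ (pvDig (N.toList.getD i ' ')) i N.toList.length M.toNat hi hdvd j hjN st
        hl0 hl1 hr0 hr1
    set s1 := pvKs.foldl (fun st k => pvStep (pvDig (N.toList.getD i ' ')) i st j k) st with hs1
    have hv0' : ∀ r c, pvGet2 s1.1 r c = pvD0 N i r c +
        if r = i+1 then (e0 c + pvS0 N i j.toNat c) else 0 := by
      intro r c
      rw [P5 r c, hv0 r c]
      have hread : pvGet2 st.1 i j.toNat = pvT N i j.toNat := by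
        rw [hv0 i j.toNat]
        rw [if_neg (by omega)]
        unfold pvD0
        rw [if_pos le_rfl]; ring
      by_cases hr : r = i + 1
      · rw [if_pos hr, if_pos hr, if_pos hr]
        unfold pvS0
        rw [hread]; ring
      · rw [if_neg hr, if_neg hr, if_neg hr]; ring
    have hv1' : ∀ r c, pvGet2 s1.2 r c = pvD1 N i r c +
        if r = i+1 then (e1 c + pvS1 N i j.toNat c) else 0 := by
      intro r c
      rw [P6 r c, hv1 r c]
      have hread0 : pvGet2 st.1 i j.toNat = pvT N i j.toNat := by
        rw [hv0 i j.toNat, if_neg (by omega)]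
        unfold pvD0
        rw [if_pos le_rfl]; ring
      have hread1 : pvGet2 st.2 i j.toNat = pvV N i j.toNat := by
        rw [hv1 i j.toNat, if_neg (by omega)]
        unfold pvD1
        rw [if_pos le_rfl]; ring
      by_cases hr : r = i + 1
      · rw [if_pos hr, if_pos hr, if_pos hr]
        unfold pvS1
        rw [hread0, hread1]; ring
      · rw [if_neg hr, if_neg hr, if_neg hr]; ring
    obtain ⟨Q1, Q2, Q3, Q4, Q5, Q6⟩ := ih hjs' s1 (fun c => e0 c + pvS0 N i j.toNat c)
      (fun c => e1 c + pvS1 N i j.toNat c) P1 P2 P3 P4 hv0' hv1'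
    refine ⟨Q1, Q2, Q3, Q4, fun r c => ?_, fun r c => ?_⟩
    · rw [show st' = js.foldl (fun st j => pvKs.foldl
        (fun st k => pvStep (pvDig (N.toList.getD i ' ')) i st j k) st) s1 from rfl, Q5 r c]
      by_cases hr : r = i + 1
      · rw [if_pos hr, if_pos hr]; simp; ring
      · rw [if_neg hr, if_neg hr]
    · rw [show st' = js.foldl (fun st j => pvKs.foldl
        (fun st k => pvStep (pvDig (N.toList.getD i ' ')) i st j k) st) s1 from rfl, Q6 r c]
      by_cases hr : r = i + 1
      · rw [if_pos hr, if_pos hr]; simp; ring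
      · rw [if_neg hr, if_neg hr]

-- sum over j in range(M) collapses to the first 8 masks
theorem pvSum_collapse (M : Int) (hM : 8 ≤ M) (g : Nat → Int)
    (hg : ∀ j : Nat, 8 ≤ j → g j = 0) :
    ((PySem.List.pyRange 0 M 1).map (fun j => g j.toNat)).sum
      = ((List.range 8).map g).sum := by
  rw [PySem.List.pyRange_one_append 0 8 M (by norm_num) hM, List.map_append, List.sum_append,
    show PySem.List.pyRange 0 8 1 = [0, 1, 2, 3, 4, 5, 6, 7] from by decide,
    show ((List.range 8).map g).sum
      = (([0, 1, 2, 3, 4, 5, 6, 7] : List Int).map (fun j => g j.toNat)).sum from by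
        simp [List.range_succ]]
  have hz : ((PySem.List.pyRange 8 M 1).map (fun j => g j.toNat)).sum = 0 := by
    apply List.sum_eq_zero
    intro x hx
    simp only [List.mem_map] at hx
    obtain ⟨j, hj, rfl⟩ := hx
    rw [PySem.List.mem_pyRange_one] at hj
    exact hg j.toNat (by omega)
  rw [hz, add_zero]

-- the initial seeding loop for dp[1]
theorem pvSeedFold (n Mn : Nat) (hM : 0 < Mn) (b : Nat) (hb : b ≤ n) :
    let st := (PySem.List.pyRange 1 (b : Int) 1).foldl (fun d i => pvSet2 d i.toNat 0 1)
      (List.replicate (n+1) (List.replicate Mn (0:Int)))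
    st.length = n + 1 ∧ (∀ r, ((st.getD r []).length) = if r < n + 1 then Mn else 0) ∧
    (∀ r c, pvGet2 st r c = if 1 ≤ r ∧ r < b ∧ c = 0 then 1 else 0) := by
  induction b with
  | zero =>
    rw [show PySem.List.pyRange 1 ((0:Nat):Int) 1 = [] from by decide, List.foldl_nil]
    refine ⟨by simp, fun r => ?_, fun r c => ?_⟩
    · by_cases hr : r < n + 1 <;> simp [List.getD, List.getElem?_replicate, hr]
    · rw [pvGet2_replicate, if_neg (by omega)]
  | succ b ih =>
    rcases Nat.eq_zero_or_pos b with rfl | hbpos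
    · rw [show PySem.List.pyRange 1 (((0:Nat)+1:Nat) : Int) 1 = [] from by decide, List.foldl_nil]
      refine ⟨by simp, fun r => ?_, fun r c => ?_⟩
      · by_cases hr : r < n + 1 <;> simp [List.getD, List.getElem?_replicate, hr]
      · rw [pvGet2_replicate, if_neg (by omega)]
    · obtain ⟨I1, I2, I3⟩ := ih (by omega)
      have hsplit : PySem.List.pyRange 1 ((b + 1 : Nat) : Int) 1
          = PySem.List.pyRange 1 (b : Nat) 1 ++ [(b : Int)] := by
        push_cast
        exact PySem.List.pyRange_one_succ_right (by exact_mod_cast hbpos)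
      rw [hsplit, List.foldl_append]
      set st0 := (PySem.List.pyRange 1 (b : Int) 1).foldl (fun d i => pvSet2 d i.toNat 0 1)
        (List.replicate (n+1) (List.replicate Mn (0:Int)))
      simp only [List.foldl_cons, List.foldl_nil]
      have hbl : (b : Int).toNat < st0.length := by rw [I1]; simp; omega
      have hrow : 0 < (st0.getD (b : Int).toNat []).length := by
        rw [I2]; simp only [Int.toNat_natCast]; rw [if_pos (by omega)]; exact hM
      refine ⟨(length_pvSet2 _ _ _ _).trans I1,
        fun r => (row_pvSet2 _ _ _ _ r).trans (I2 r), fun r c => ?_⟩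
      rw [pvGet2_pvSet2 _ _ _ _ hbl hrow r c, I3 r c]
      simp only [Int.toNat_natCast]
      by_cases h : r = b ∧ c = 0
      · rw [if_pos h, if_pos (by omega)]
      · rw [if_neg h]
        by_cases h2 : 1 ≤ r ∧ r < b ∧ c = 0
        · rw [if_pos h2, if_pos (by omega)]
        · rw [if_neg h2, if_neg (by omega)]

-- ---------- phase 1: outer induction and characterisation of A ----------
def pvInit (N : String) (M : Int) : List (List Int) × List (List Int) :=
  (pvSet2 (List.replicate (N.toList.length+1) (List.replicate M.toNat 0)) 0 0 1,
   (PySem.List.pyRange 1 (N.toList.length : Int) 1).foldl (fun d i => pvSet2 d i.toNat 0 1)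
     (List.replicate (N.toList.length+1) (List.replicate M.toNat 0)))

def pvRun (N : String) (M : Int) (i : Nat) : List (List Int) × List (List Int) :=
  (PySem.List.pyRange 0 (i : Int) 1).foldl (fun st i =>
    (PySem.List.pyRange 0 M 1).foldl (fun st j =>
      ([3, 5, 7] : List Int).foldl
        (fun st k => pvStep (pvDig (N.toList.getD i.toNat ' ')) i.toNat st j k) st) st)
    (pvInit N M)

theorem pvOuter (N : String) (M : Int) (hM : 8 ≤ M)
    (hdvd : N.toList.length ≠ 0 → (8:Int) ∣ M) (i : Nat) (hi : i ≤ N.toList.length) :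
    (pvRun N M i).1.length = N.toList.length + 1 ∧
    (pvRun N M i).2.length = N.toList.length + 1 ∧
    (∀ r, (((pvRun N M i).1.getD r []).length) = if r < N.toList.length + 1 then M.toNat else 0) ∧
    (∀ r, (((pvRun N M i).2.getD r []).length) = if r < N.toList.length + 1 then M.toNat else 0) ∧
    (∀ r c, pvGet2 (pvRun N M i).1 r c = pvD0 N i r c) ∧
    (∀ r c, pvGet2 (pvRun N M i).2 r c = pvD1 N i r c) := by
  have hMn : 0 < M.toNat := by omega
  induction i with
  | zero =>
    rw [show pvRun N M 0 = pvInit N M from by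
      unfold pvRun
      rw [show PySem.List.pyRange 0 ((0:Nat):Int) 1 = [] from by decide, List.foldl_nil]]
    obtain ⟨S1, S2, S3⟩ := pvSeedFold N.toList.length M.toNat hMn N.toList.length le_rfl
    have hset : 0 < ((List.replicate (N.toList.length+1)
        (List.replicate M.toNat (0:Int))).getD 0 []).length := by
      simp [List.getD, List.getElem?_replicate]
      omega
    refine ⟨(length_pvSet2 _ _ _ _).trans (by simp), S1,
      fun r => (row_pvSet2 _ _ _ _ r).trans ?_, S2, fun r c => ?_, fun r c => ?_⟩
    · by_cases hr : r < N.toList.length + 1 <;>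
        simp only [List.getD, List.getElem?_replicate, hr, if_true, if_false,
          Option.getD_some, Option.getD_none, List.length_replicate, List.length_nil]
        <;> simp [hr]
    · rw [show (pvInit N M).1 = pvSet2 (List.replicate (N.toList.length+1)
          (List.replicate M.toNat 0)) 0 0 1 from rfl]
      rw [pvGet2_pvSet2 _ _ _ _ (by simp) hset r c]
      unfold pvD0
      by_cases h : r = 0 ∧ c = 0
      · rw [if_pos h, if_pos (by omega), h.1, h.2]
        simp [pvT]
      · rw [if_neg h, pvGet2_replicate]
        by_cases hr : r ≤ 0
        · rw [if_pos hr]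
          have : r = 0 := by omega
          subst this
          simp only [pvT]
          rw [if_neg (by omega)]
        · rw [if_neg hr]
    · rw [show (pvInit N M).2 = (PySem.List.pyRange 1 (N.toList.length : Int) 1).foldl
          (fun d i => pvSet2 d i.toNat 0 1)
          (List.replicate (N.toList.length+1) (List.replicate M.toNat 0)) from rfl, S3 r c]
      unfold pvD1 pvSeed
      by_cases hr : r ≤ 0
      · have : r = 0 := by omega
        subst this
        rw [if_pos le_rfl]
        simp only [pvV]
        rw [if_neg (by omega)]
      · rw [if_neg hr]
  | succ i ih =>
    have hiL : i < N.toList.length := by omega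
    have hdvd8 : 8 ∣ M.toNat := by
      have h8 : (8:Int) ∣ M := hdvd (by omega)
      omega
    obtain ⟨I1, I2, I3, I4, I5, I6⟩ := ih (by omega)
    have hrun : pvRun N M (i+1) = (PySem.List.pyRange 0 M 1).foldl (fun st j => pvKs.foldl
        (fun st k => pvStep (pvDig (N.toList.getD i ' ')) i st j k) st) (pvRun N M i) := by
      unfold pvRun
      rw [show PySem.List.pyRange 0 ((i + 1 : Nat) : Int) 1
          = PySem.List.pyRange 0 (i : Nat) 1 ++ [(i : Int)] from by
        push_cast
        exact PySem.List.pyRange_one_succ_right (by positivity), List.foldl_append]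
      simp only [List.foldl_cons, List.foldl_nil, Int.toNat_natCast]
      rfl
    rw [hrun]
    have hjs : ∀ j ∈ PySem.List.pyRange 0 M 1, 0 ≤ j ∧ j < M := by
      intro j hj
      rw [PySem.List.mem_pyRange_one] at hj
      exact hj
    obtain ⟨C1, C2, C3, C4, C5, C6⟩ := pvCol N M i hiL hdvd8 (PySem.List.pyRange 0 M 1) hjs
      (pvRun N M i) (fun _ => 0) (fun _ => 0) I1 I2 I3 I4
      (fun r c => by rw [I5 r c]; simp) (fun r c => by rw [I6 r c]; simp)
    have hsum0 : ∀ c, ((PySem.List.pyRange 0 M 1).map (fun j => pvS0 N i j.toNat c)).sum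
        = pvT N (i+1) c := by
      intro c
      rw [pvSum_collapse M hM (fun j => pvS0 N i j c) (fun j hj => pvS0_hi N i hj c), ← pvT_succ]
    have hsum1 : ∀ c, ((PySem.List.pyRange 0 M 1).map (fun j => pvS1 N i j.toNat c)).sum
        = pvV N (i+1) c - pvSeed N (i+1) c := by
      intro c
      rw [pvSum_collapse M hM (fun j => pvS1 N i j c) (fun j hj => pvS1_hi N i hj c)]
      rw [pvV_succ]
      ring
    refine ⟨C1, C2, C3, C4, fun r c => ?_, fun r c => ?_⟩
    · rw [C5 r c]
      unfold pvD0
      by_cases hr : r = i + 1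
      · subst hr
        rw [if_neg (by omega), if_pos rfl, if_pos (le_refl _), hsum0 c]
        ring
      · rw [if_neg hr]
        by_cases hr2 : r ≤ i
        · rw [if_pos hr2, if_pos (by omega)]
          ring
        · rw [if_neg hr2, if_neg (by omega)]
          ring
    · rw [C6 r c]
      unfold pvD1
      by_cases hr : r = i + 1
      · subst hr
        rw [if_neg (by omega), if_pos rfl, if_pos (le_refl _), hsum1 c]
        ring
      · rw [if_neg hr]
        by_cases hr2 : r ≤ i
        · rw [if_pos hr2, if_pos (by omega)]
          ring
        · rw [if_neg hr2, if_neg (by omega)]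
          ring

theorem digit_eq_model (N : String) (M : Int) (hM : 8 ≤ M)
    (hdvd : N.toList.length ≠ 0 → (8:Int) ∣ M) :
    digit N M = pvT N N.toList.length 7 + pvV N N.toList.length 7 := by
  obtain ⟨-, -, -, -, H5, H6⟩ := pvOuter N M hM hdvd N.toList.length le_rfl
  have hd : digit N M = pvGet2 (pvRun N M N.toList.length).1 N.toList.length 7 +
      pvGet2 (pvRun N M N.toList.length).2 N.toList.length 7 := rfl
  rw [hd, H5, H6]
  unfold pvD0 pvD1
  rw [if_pos le_rfl, if_pos le_rfl]

-- ---------- phase 2: completion counts and closed forms ----------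
def pvComp : Nat → Nat → Int
  | 0, j => if j = 7 then 1 else 0
  | r+1, j => (pvKs.map (fun k => pvComp r (pvF j k))).sum

def pvG : List Char → Nat → Int
  | [], m => if m = 7 then 1 else 0
  | ch :: rest, m =>
    (pvKs.map (fun k => if k < pvDig ch then pvComp rest.length (pvF m k) else 0)).sum +
    (if pvKs.contains (pvDig ch) then pvG rest (pvF m (pvDig ch)) else 0)

theorem pvComp_cf (r : Nat) :
    pvComp r 7 = 3^r ∧ pvComp r 3 = 3^r - 2^r ∧ pvComp r 5 = 3^r - 2^r ∧
    pvComp r 6 = 3^r - 2^r ∧ pvComp r 1 = 3^r - 2*2^r + 1 ∧ pvComp r 2 = 3^r - 2*2^r + 1 ∧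
    pvComp r 4 = 3^r - 2*2^r + 1 ∧ pvComp r 0 = 3^r - 3*2^r + 3 - (if r = 0 then 1 else 0) := by
  induction r with
  | zero => norm_num [pvComp]
  | succ r ih =>
    obtain ⟨i7, i3, i5, i6, i1, i2, i4, i0⟩ := ih
    simp only [pvComp, pvKs, pvF, List.map_cons, List.map_nil, List.sum_cons, List.sum_nil]
    norm_num
    simp only [show (7|||1:Nat)=7 from rfl, show (7|||2:Nat)=7 from rfl, show (7|||4:Nat)=7 from rfl, show (3|||1:Nat)=3 from rfl, show (3|||2:Nat)=3 from rfl, show (3|||4:Nat)=7 from rfl, show (5|||1:Nat)=5 from rfl, show (5|||2:Nat)=7 from rfl, show (5|||4:Nat)=5 from rfl, show (6|||1:Nat)=7 from rfl, show (6|||2:Nat)=6 from rfl, show (6|||4:Nat)=6 from rfl, show (1|||2:Nat)=3 from rfl, show (1|||4:Nat)=5 from rfl, show (2|||1:Nat)=3 from rfl, show (2|||4:Nat)=6 from rfl, show (4|||1:Nat)=5 from rfl, show (4|||2:Nat)=6 from rfl]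
    rw [i7, i3, i5, i6, i1, i2, i4]
    refine ⟨by ring, by ring, by ring, by ring, by ring, by ring, by ring, by ring⟩

theorem pvWays_0 (r : Int) : pvWays 0 r = 3 ^ r.toNat := by
  simp [pvWays, show PySem.List.pyRange 0 1 1 = [0] from by decide]

theorem pvWays_1 (r : Int) : pvWays 1 r = 3 ^ r.toNat - 2 ^ r.toNat := by
  simp [pvWays, show PySem.List.pyRange 0 2 1 = [0, 1] from by decide]
  ring

theorem pvWays_2 (r : Int) : pvWays 2 r = 3 ^ r.toNat - 2 * 2 ^ r.toNat + 1 := by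
  simp [pvWays, show PySem.List.pyRange 0 3 1 = [0, 1, 2] from by decide]
  ring

theorem pvWays_3 (r : Int) :
    pvWays 3 r = 3 ^ r.toNat - 3 * 2 ^ r.toNat + 3 - (if r.toNat = 0 then 1 else 0) := by
  simp [pvWays, show PySem.List.pyRange 0 4 1 = [0, 1, 2, 3] from by decide]
  rcases Nat.eq_zero_or_pos r.toNat with h | h
  · rw [h, if_pos (by omega : r ≤ 0)]
    norm_num
  · rw [if_neg (by omega), zero_pow (by omega)]
    ring

-- ---------- phase 2: the scan computes G ----------
def pvMaskList (m : Nat) : List Int :=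
  (if m % 2 = 1 then [(3:Int)] else []) ++ (if m / 2 % 2 = 1 then [5] else []) ++
  (if m / 4 % 2 = 1 then [7] else [])

-- popcount facts about the 8 masks, all decidable
theorem pvMask_fix : ∀ m, m < 8 → ∀ x ∈ pvKs, x ∈ pvMaskList m → pvF m x = m := by decide

theorem pvMask_app : ∀ m, m < 8 → ∀ x ∈ pvKs, x ∉ pvMaskList m →
    (pvMaskList m ++ [x]).Perm (pvMaskList (pvF m x)) := by decide

theorem pvMask_len : ∀ m, m < 8 → ∀ x ∈ pvKs,
    (if x ∈ pvMaskList m then ((pvMaskList m).length : Int)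
     else ((pvMaskList m).length : Int) + 1) = ((pvMaskList (pvF m x)).length : Int) := by decide

theorem pvWays_comp (j : Nat) (hj : j < 8) (r : Nat) :
    pvWays (3 - ((pvMaskList j).length : Int)) ((r : Int)) = pvComp r j := by
  obtain ⟨c7, c3, c5, c6, c1, c2, c4, c0⟩ := pvComp_cf r
  interval_cases j <;>
    simp only [pvMaskList, List.length_append, List.length_cons, List.length_nil] <;> norm_num
  · rw [pvWays_3, c0]
    simp
  · rw [pvWays_2, c1]
    simp
  · rw [pvWays_2, c2]
    simp
  · rw [pvWays_1, c3]
    simp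
  · rw [pvWays_2, c4]
    simp
  · rw [pvWays_1, c5]
    simp
  · rw [pvWays_1, c6]
    simp
  · rw [pvWays_0, c7]
    simp

theorem pvScan_eq (rest : List Char) (seen : PySem.Set Int) (m : Nat) (total : Int)
    (hm : m < 8) (hp : seen.Perm (pvMaskList m)) :
    pvScan rest seen total = total + pvG rest m := by
  induction rest generalizing seen m total with
  | nil =>
    show (if PySem.Set.len seen = 3 then total + 1 else total) = total + pvG [] m
    rw [show PySem.Set.len seen = (seen.length : Int) from rfl, hp.length_eq]
    interval_cases m <;> simp [pvMaskList, pvG]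
  | cons ch rest ih =>
    have hmem : ∀ x : Int, (x ∈ seen) ↔ x ∈ pvMaskList m := fun x => hp.mem_iff
    have hun : ∀ x : Int, PySem.Set.union seen [x] = PySem.Set.add seen x := by
      intro x
      show seen.update [x] = _
      rw [PySem.Set.update_cons, PySem.Set.update_nil]
    have hW : ∀ x ∈ pvKs, pvWays (3 - PySem.Set.len (PySem.Set.union seen [x]))
        ((rest.length : Nat) : Int) = pvComp rest.length (pvF m x) := by
      intro x hx
      rw [hun x, show PySem.Set.len (PySem.Set.add seen x)
          = (((PySem.Set.add seen x).length : Nat) : Int) from rfl, PySem.Set.add_eq_ite]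
      have hlen2 : (((if x ∈ seen then seen else seen ++ [x]).length : Nat) : Int)
          = ((pvMaskList (pvF m x)).length : Int) := by
        rw [← pvMask_len m hm x hx]
        by_cases h : x ∈ seen
        · rw [if_pos h, if_pos ((hmem x).1 h), hp.length_eq]
        · rw [if_neg h, if_neg (fun hc => h ((hmem x).2 hc))]
          simp [hp.length_eq]
      rw [hlen2, pvWays_comp (pvF m x) (pvF_lt8 hm x) rest.length]
    have hperm : ∀ x ∈ pvKs, (PySem.Set.add seen x).Perm (pvMaskList (pvF m x)) := by
      intro x hx
      rw [PySem.Set.add_eq_ite]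
      by_cases h : x ∈ seen
      · rw [if_pos h, pvMask_fix m hm x hx ((hmem x).1 h)]
        exact hp
      · rw [if_neg h]
        exact (hp.append_right [x]).trans
          (pvMask_app m hm x hx (fun hc => h ((hmem x).2 hc)))
    show (if ([3,5,7] : List Int).contains (pvDig ch) then
        pvScan rest (PySem.Set.add seen (pvDig ch)) (([3,5,7] : List Int).foldl _ total)
      else (([3,5,7] : List Int).foldl _ total)) = total + pvG (ch :: rest) m
    simp only [List.foldl_cons, List.foldl_nil]
    have hG : pvG (ch :: rest) m = (pvKs.map (fun k =>
        if k < pvDig ch then pvComp rest.length (pvF m k) else 0)).sum +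
        (if pvKs.contains (pvDig ch) then pvG rest (pvF m (pvDig ch)) else 0) := rfl
    rw [hG]
    rw [hW 3 (by decide), hW 5 (by decide), hW 7 (by decide)]
    by_cases hd : ([3,5,7] : List Int).contains (pvDig ch)
    · rw [if_pos hd, if_pos (show pvKs.contains (pvDig ch) from hd)]
      have hdmem : pvDig ch ∈ pvKs := by
        have := hd
        simpa [pvKs] using this
      rw [ih _ (pvF m (pvDig ch)) _ (pvF_lt8 hm (pvDig ch)) (hperm _ hdmem)]
      simp only [pvKs, List.map_cons, List.map_nil, List.sum_cons, List.sum_nil]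
      split_ifs <;> ring
    · rw [if_neg hd, if_neg (show ¬ pvKs.contains (pvDig ch) = true from hd)]
      simp only [pvKs, List.map_cons, List.map_nil, List.sum_cons, List.sum_nil]
      split_ifs <;> ring

-- ---------- phase 2: propagation (H) ----------
def pvH (N : String) (i : Nat) : Int :=
  ((List.range 8).map (fun j => pvV N i j * pvComp (N.toList.length - i) j)).sum +
  ((List.range 8).map (fun j => pvT N i j * pvG (N.toList.drop i) j)).sum

theorem pvH_last (N : String) :
    pvH N N.toList.length = pvV N N.toList.length 7 + pvT N N.toList.length 7 := by
  unfold pvH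
  rw [Nat.sub_self, List.drop_length]
  simp [List.range_succ, pvComp, pvG]

theorem pvLSum (n : Nat) (f : Nat → Int) :
    ((List.range n).map f).sum = ∑ i ∈ Finset.range n, f i := by
  induction n with
  | zero => simp
  | succ n ih =>
    rw [List.range_succ, Finset.sum_range_succ, List.map_append, List.sum_append, ih]
    all_goals simp

theorem pvExchange (f : Nat → Int → Int) (g : Nat → Int) :
    ∑ c ∈ Finset.range 8,
      (∑ j ∈ Finset.range 8, (pvKs.map (fun k => if c = pvF j k then f j k else 0)).sum) * g c
    = ∑ j ∈ Finset.range 8, (pvKs.map (fun k => f j k * g (pvF j k))).sum := by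
  have h1 : ∀ c ∈ Finset.range 8,
      (∑ j ∈ Finset.range 8, (pvKs.map (fun k => if c = pvF j k then f j k else 0)).sum) * g c
      = ∑ j ∈ Finset.range 8, (pvKs.map (fun k => if c = pvF j k then f j k else 0)).sum * g c :=
    fun c _ => Finset.sum_mul _ _ _
  rw [Finset.sum_congr rfl h1, Finset.sum_comm]
  refine Finset.sum_congr rfl (fun j hj => ?_)
  have hj8 : j < 8 := Finset.mem_range.mp hj
  simp only [pvKs, List.map_cons, List.map_nil, List.sum_cons, List.sum_nil]
  have expand : ∀ c : Nat,
      ((if c = pvF j 3 then f j 3 else 0) + ((if c = pvF j 5 then f j 5 else 0) +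
        ((if c = pvF j 7 then f j 7 else 0) + 0))) * g c
      = (if c = pvF j 3 then f j 3 * g c else 0) + ((if c = pvF j 5 then f j 5 * g c else 0) +
        ((if c = pvF j 7 then f j 7 * g c else 0) + 0)) := by
    intro c; split_ifs <;> ring
  rw [Finset.sum_congr rfl (fun c _ => expand c)]
  rw [Finset.sum_add_distrib, Finset.sum_add_distrib, Finset.sum_add_distrib]
  have key : ∀ k : Int, ∑ c ∈ Finset.range 8, (if c = pvF j k then f j k * g c else 0)
      = f j k * g (pvF j k) := by
    intro k
    rw [Finset.sum_eq_single (pvF j k)]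
    · rw [if_pos rfl]
    · intro b _ hb; rw [if_neg hb]
    · intro hmem; exact absurd (Finset.mem_range.mpr (pvF_lt8 hj8 k)) hmem
  simp only [Finset.sum_const_zero]
  rw [key 3, key 5, key 7]

theorem pvSeedSum (N : String) (i : Nat) (g : Nat → Int) :
    ∑ c ∈ Finset.range 8, pvSeed N (i+1) c * g c
      = if i+1 < N.toList.length then g 0 else 0 := by
  simp only [Finset.sum_range_succ, Finset.sum_range_zero, pvSeed]
  norm_num

theorem pvPerJ_v (d : Int) (v t : Int) (g : Nat → Int) (j : Nat) :
    (pvKs.map (fun k => (v + if k < d then t else 0) * g (pvF j k))).sum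
    = v * (pvKs.map (fun k => g (pvF j k))).sum
      + t * (pvKs.map (fun k => if k < d then g (pvF j k) else 0)).sum := by
  simp only [pvKs, List.map_cons, List.map_nil, List.sum_cons, List.sum_nil]
  split_ifs <;> ring

theorem pvPerJ_t (d : Int) (t : Int) (g : Nat → Int) (j : Nat) :
    (pvKs.map (fun k => (if k = d then t else 0) * g (pvF j k))).sum
    = t * (if pvKs.contains d then g (pvF j d) else 0) := by
  simp only [pvKs, List.map_cons, List.map_nil, List.sum_cons, List.sum_nil]
  by_cases h3 : (3:Int) = d
  · subst h3; simp
  by_cases h5 : (5:Int) = d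
  · subst h5; simp
  by_cases h7 : (7:Int) = d
  · subst h7; simp
  · have hc : ¬ (([3,5,7] : List Int).contains d = true) := by
      intro hcc
      simp only [List.contains_cons, List.contains_nil, Bool.or_eq_true, beq_iff_eq] at hcc
      rcases hcc with h | h | h | h
      · exact h3 h.symm
      · exact h5 h.symm
      · exact h7 h.symm
      · exact absurd h (by simp)
    rw [if_neg h3, if_neg h5, if_neg h7, if_neg hc]
    ring

set_option maxHeartbeats 1000000 in
theorem pvH_step (N : String) (i : Nat) (hi : i < N.toList.length) :
    pvH N (i+1) = pvH N i +
      (if i+1 < N.toList.length then pvComp (N.toList.length - (i+1)) 0 else 0) := by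
  have hL1 : N.toList.length - i = (N.toList.length - (i+1)) + 1 := by omega
  have hdrop : N.toList.drop i = N.toList.getD i ' ' :: N.toList.drop (i+1) := by
    rw [List.getD_eq_getElem?_getD, List.getElem?_eq_getElem hi]
    exact (List.getElem_cons_drop hi).symm
  set r := N.toList.length - (i+1) with hr
  unfold pvH
  rw [hL1, hdrop, pvLSum, pvLSum, pvLSum, pvLSum]
  have hv : ∀ c, pvV N (i+1) c = pvSeed N (i+1) c +
      ∑ j ∈ Finset.range 8, (pvKs.map (fun k => if c = pvF j k then
        (pvV N i j + if k < pvDig (N.toList.getD i ' ') then pvT N i j else 0) else 0)).sum := by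
    intro c
    rw [pvV_succ, pvLSum]
    rfl
  have ht : ∀ c, pvT N (i+1) c =
      ∑ j ∈ Finset.range 8, (pvKs.map (fun k => if c = pvF j k then
        (if k = pvDig (N.toList.getD i ' ') then pvT N i j else 0) else 0)).sum := by
    intro c
    rw [pvT_succ, pvLSum]
    refine Finset.sum_congr rfl (fun j _ => ?_)
    unfold pvS0
    congr 1
    refine List.map_congr_left (fun k _ => ?_)
    by_cases h1 : c = pvF j k
    · by_cases h2 : k = pvDig (N.toList.getD i ' ')
      · rw [if_pos ⟨h1, h2⟩, if_pos h1, if_pos h2]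
      · rw [if_neg (fun hh => h2 hh.2), if_pos h1, if_neg h2]
    · rw [if_neg (fun hh => h1 hh.1), if_neg h1]
  have hcompsucc : ∀ j, (pvKs.map (fun k => pvComp r (pvF j k))).sum = pvComp (r+1) j :=
    fun j => rfl
  have step1 : ∑ c ∈ Finset.range 8, pvV N (i+1) c * pvComp r c
      = (if i+1 < N.toList.length then pvComp r 0 else 0)
        + (∑ j ∈ Finset.range 8, pvV N i j * pvComp (r+1) j
           + ∑ j ∈ Finset.range 8, pvT N i j *
              (pvKs.map (fun k => if k < pvDig (N.toList.getD i ' ') then pvComp r (pvF j k) else 0)).sum) := by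
    rw [Finset.sum_congr rfl (fun c (_ : c ∈ Finset.range 8) => by rw [hv c, add_mul])]
    rw [Finset.sum_add_distrib, pvSeedSum N i (fun c => pvComp r c)]
    congr 1
    rw [pvExchange (fun j k => pvV N i j + if k < pvDig (N.toList.getD i ' ') then pvT N i j else 0)
      (fun c => pvComp r c)]
    rw [Finset.sum_congr rfl (fun j (_ : j ∈ Finset.range 8) => pvPerJ_v (pvDig (N.toList.getD i ' ')) (pvV N i j)
      (pvT N i j) (fun c => pvComp r c) j)]
    rw [Finset.sum_add_distrib]
    exact congrArg₂ (· + ·)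
      (Finset.sum_congr rfl (fun j _ => congrArg (HMul.hMul (pvV N i j)) (hcompsucc j))) rfl
  have step2 : ∑ c ∈ Finset.range 8, pvT N (i+1) c * pvG (N.toList.drop (i+1)) c
      = ∑ j ∈ Finset.range 8, pvT N i j *
          (if pvKs.contains (pvDig (N.toList.getD i ' ')) then pvG (N.toList.drop (i+1)) (pvF j (pvDig (N.toList.getD i ' '))) else 0) := by
    rw [Finset.sum_congr rfl (fun c (_ : c ∈ Finset.range 8) => by rw [ht c])]
    rw [pvExchange (fun j k => if k = pvDig (N.toList.getD i ' ') then pvT N i j else 0)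
      (fun c => pvG (N.toList.drop (i+1)) c)]
    exact Finset.sum_congr rfl (fun j _ => pvPerJ_t (pvDig (N.toList.getD i ' ')) (pvT N i j)
      (fun c => pvG (N.toList.drop (i+1)) c) j)
  have hGdrop : ∀ c, pvG (N.toList.getD i ' ' :: N.toList.drop (i+1)) c
      = (pvKs.map (fun k => if k < pvDig (N.toList.getD i ' ') then pvComp r (pvF c k) else 0)).sum
        + (if pvKs.contains (pvDig (N.toList.getD i ' ')) then pvG (N.toList.drop (i+1)) (pvF c (pvDig (N.toList.getD i ' '))) else 0) := by
    intro c
    show (pvKs.map (fun k => if k < pvDig (N.toList.getD i ' ') then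
        pvComp (N.toList.drop (i+1)).length (pvF c k) else 0)).sum
      + (if pvKs.contains (pvDig (N.toList.getD i ' ')) then pvG (N.toList.drop (i+1)) (pvF c (pvDig (N.toList.getD i ' '))) else 0) = _
    rw [List.length_drop]
  rw [step1, step2]
  have hT : ∑ c ∈ Finset.range 8, pvT N i c * pvG (N.toList.getD i ' ' :: N.toList.drop (i+1)) c
      = ∑ c ∈ Finset.range 8, pvT N i c *
          (pvKs.map (fun k => if k < pvDig (N.toList.getD i ' ') then pvComp r (pvF c k) else 0)).sum
        + ∑ c ∈ Finset.range 8, pvT N i c *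
            (if pvKs.contains (pvDig (N.toList.getD i ' ')) then pvG (N.toList.drop (i+1)) (pvF c (pvDig (N.toList.getD i ' '))) else 0) := by
    rw [← Finset.sum_add_distrib]
    exact Finset.sum_congr rfl (fun c _ => by rw [hGdrop c, mul_add])
  rw [hT]
  ring

theorem pvH_chain_aux (N : String) : ∀ i, i ≤ N.toList.length → pvH N i = pvH N 0 +
    ((List.range i).map (fun n => if n+1 < N.toList.length then
      pvComp (N.toList.length - (n+1)) 0 else 0)).sum := by
  intro i
  induction i with
  | zero => simp
  | succ i ih =>
    intro hi
    rw [pvH_step N i (by omega), ih (by omega), List.range_succ, List.map_append,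
      List.sum_append]
    simp
    ring

theorem pvH_chain (N : String) :
    pvH N N.toList.length = pvH N 0 + ((List.range (N.toList.length - 1)).map
      (fun n => pvComp (N.toList.length - (n+1)) 0)).sum := by
  rcases Nat.eq_zero_or_pos N.toList.length with h0 | hpos
  · rw [h0]
    simp
  · obtain ⟨m, hm⟩ : ∃ m, N.toList.length = m + 1 := ⟨N.toList.length - 1, by omega⟩
    rw [pvH_chain_aux N N.toList.length le_rfl]
    congr 1
    rw [hm, List.range_succ, List.map_append, List.sum_append]
    rw [show (m + 1) - 1 = m from by omega]
    rw [List.map_congr_left (fun n (hn : n ∈ List.range m) => by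
      rw [if_pos (by have := List.mem_range.mp hn; omega)])]
    simp

theorem pvH_zero (N : String) : pvH N 0 = pvG N.toList 0 := by
  unfold pvH
  simp [List.range_succ, pvV, pvT]

theorem digit_alt_eq_model (N : String) (M : Int) :
    digit_alt N M = pvG N.toList 0 + ((List.range (N.toList.length - 1)).map
      (fun n => pvComp (N.toList.length - (n+1)) 0)).sum := by
  have hscan := pvScan_eq N.toList PySem.Set.empty 0
    ((PySem.List.pyRange 1 ((N.toList.length : Int)) 1).foldl (fun t n => t + pvWays 3 n) 0)
    (by norm_num) List.Perm.nil
  rw [show digit_alt N M = pvScan N.toList PySem.Set.empty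
      ((PySem.List.pyRange 1 ((N.toList.length : Int)) 1).foldl
        (fun t n => t + pvWays 3 n) 0) from rfl, hscan]
  rw [PySem.List.foldl_add, zero_add, add_comm]
  congr 1
  have hpr : PySem.List.pyRange 1 (N.toList.length : Int) 1
      = (List.range (N.toList.length - 1)).map (fun k => ((1 + k : Nat) : Int)) := by
    rw [PySem.List.pyRange_one]
    rw [show ((N.toList.length : Int) - 1).toNat = N.toList.length - 1 from by omega]
    exact List.map_congr_left (fun k _ => by push_cast; ring)
  have hcw : ∀ k : Nat, pvWays 3 (((1 + k : Nat)) : Int) = pvComp (1+k) 0 := by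
    intro k
    rw [pvWays_3, Int.toNat_natCast, (pvComp_cf (1+k)).2.2.2.2.2.2.2]
  rw [hpr, List.map_map,
    show ((fun n => pvWays 3 n) ∘ fun k : Nat => ((1 + k : Nat) : Int))
      = fun k : Nat => pvComp (1+k) 0 from funext fun k => hcw k, pvLSum, pvLSum]
  rcases Nat.eq_zero_or_pos N.toList.length with h0 | hpos
  · rw [h0]
    rfl
  · rw [← Finset.sum_range_reflect (fun k => pvComp (1+k) 0) (N.toList.length - 1)]
    refine Finset.sum_congr rfl (fun j hj => ?_)
    have hjm := Finset.mem_range.mp hj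
    rw [show 1 + (N.toList.length - 1 - 1 - j) = N.toList.length - (j+1) from by omega]

-- ===== VERDICT (by name: the statement is the Claim_ definition above) =====
theorem digit_spec : Claim_equal_digit := by
  intro N M _ hpre
  unfold Spec_digit
  obtain ⟨hdig, hM, hor⟩ := hpre
  have hdvd : N.toList.length ≠ 0 → (8:Int) ∣ M := by
    intro h; rcases hor with h0 | h8
    · exact absurd (by simp [h0]) h
    · exact h8
  rw [digit_eq_model N M hM hdvd, digit_alt_eq_model N M,
      show pvT N N.toList.length 7 + pvV N N.toList.length 7 = pvH N N.toList.length by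
        rw [pvH_last]; ring,
      pvH_chain N, pvH_zero]
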